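-- pv_equiv track=rewrite | github.com/ChanHoLee275/backjoon | Implementation/18311.py | solution
-- ===== SOURCE A (Python) =====
-- def solution(arrays, k):
--     total_distance = sum(arrays)
--     reverse_arrays = list(reversed(arrays[:]))
--     if k > total_distance:
--         k -= total_distance
--         for i in range(len(reverse_arrays)):
--             if reverse_arrays[i] > k:
--                 return len(arrays) - i
--             else:
--                 k -= reverse_arrays[i]
--     else:
--         for i in range(len(arrays)):
--             if arrays[i] > k:
--                 return i + 1
--             else:
--                 k -= arrays[i]
-- ===== SOURCE B (Python) =====
-- def solution(arrays, k):
--     total = sum(arrays)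
--     c = 2 * total - k
--     s = 0
--     fwd = None   # first position whose inclusive prefix sum exceeds k
--     last = None  # last position whose exclusive prefix sum is strictly below c
--     for i, x in enumerate(arrays):
--         if s < c:
--             last = i + 1
--         s += x
--         if fwd is None and s > k:
--             fwd = i + 1
--     return last if k > total else fwd
-- ===== Notes on version B (the rewrite author's own statement) =====
-- stated objective: alternative
-- what changed: B replaces A's two branch-specific running-subtraction scans (one over a reversed copy of the array) by a single combined forward pass that maintains both candidate answers at once - the first position whose inclusive prefix sum exceeds k and the last position whose exclusive prefix sum is below 2*total-k - and selects one at the end; the wrap-around case is thus answered by a forward last-match traversal instead of a reversed-copy first-match scan.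
-- outside the precondition, e.g. on solution([1], 5): A returns None, B returns None; on solution([1, 2], 3): A returns None, B returns None
import Mathlib
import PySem

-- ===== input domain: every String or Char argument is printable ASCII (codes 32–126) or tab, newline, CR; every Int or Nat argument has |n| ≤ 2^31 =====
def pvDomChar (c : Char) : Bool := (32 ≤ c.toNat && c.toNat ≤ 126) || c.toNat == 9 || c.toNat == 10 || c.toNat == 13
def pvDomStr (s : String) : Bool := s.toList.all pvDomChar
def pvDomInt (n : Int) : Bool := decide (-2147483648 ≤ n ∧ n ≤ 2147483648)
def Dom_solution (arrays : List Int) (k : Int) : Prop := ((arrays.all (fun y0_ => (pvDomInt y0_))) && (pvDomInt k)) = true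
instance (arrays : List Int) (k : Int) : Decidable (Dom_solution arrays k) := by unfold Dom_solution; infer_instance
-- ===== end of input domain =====

-- B answers both cases in one combined forward pass (first-crossing and last-below-threshold
-- candidates kept simultaneously, no reversed copy) instead of A's two branch-specific
-- running-subtraction scans; objective: alternative (same O(n) cost).


-- ===== PORT A =====
-- forward loop: "for i in range(len(arrays)): if arrays[i] > k: return i+1 else k -= arrays[i]"
-- (0 is the port's value for Python's implicit None fallthrough, excluded by Pre_)
def loopFwdA : List Int → Int → Int → Int
  | [], _, _ => 0
  | x :: xs, k, i => if x > k then i + 1 else loopFwdA xs (k - x) (i + 1)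

-- reverse loop: "for i in range(len(reverse_arrays)): if reverse_arrays[i] > k: return len(arrays)-i else k -= reverse_arrays[i]"
def loopRevA : List Int → Int → Int → Int → Int
  | [], _, _, _ => 0
  | y :: ys, k, j, n => if y > k then n - j else loopRevA ys (k - y) (j + 1) n

def solution (arrays : List Int) (k : Int) : Int :=
  let total_distance := arrays.sum
  let reverse_arrays := arrays.reverse
  if k > total_distance then
    loopRevA reverse_arrays (k - total_distance) 0 (arrays.length : Int)
  else
    loopFwdA arrays k 0

-- ===== PORT B =====
-- "for i, x in enumerate(arrays): if s < c: last = i+1; s += x; if fwd is None and s > k: fwd = i+1"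
-- transliterated as structural recursion over the list with the loop state (s, i, fwd, last)
def loopB (k c : Int) : List Int → Int → Int → Option Int → Option Int → (Option Int × Option Int)
  | [], _, _, fwd, last => (fwd, last)
  | x :: xs, s, i, fwd, last =>
      let last' := if s < c then some (i + 1) else last
      let s' := s + x
      let fwd' := if fwd = none ∧ s' > k then some (i + 1) else fwd
      loopB k c xs s' (i + 1) fwd' last'

-- "return last if k > total else fwd"; None is rendered as 0 (the same convention as port A's
-- fallthrough value; those inputs are excluded by Pre_)
def solution_alt (arrays : List Int) (k : Int) : Int :=
  let total := arrays.sum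
  let c := 2 * total - k
  let r := loopB k c arrays 0 0 none none
  (if k > total then r.2 else r.1).getD 0

-- ===== PRECONDITION & SPEC =====
-- Pre_ excludes exactly the inputs on which the Python A falls off the loop and returns
-- None (not an int): in the taken branch no position ever satisfies the strict threshold.
def Pre_solution (arrays : List Int) (k : Int) : Prop :=
  (if k > arrays.sum then
    (List.range arrays.length).any (fun j => decide ((arrays.take j).sum < 2 * arrays.sum - k))
  else
    (List.range arrays.length).any (fun i => decide ((arrays.take (i + 1)).sum > k))) = true

instance (arrays : List Int) (k : Int) : Decidable (Pre_solution arrays k) := by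
  unfold Pre_solution; infer_instance

def pvWitness_solution : List Int × Int := ([1, 2, 3], 2)

def Spec_solution (arrays : List Int) (k : Int) (out : Int) : Prop := out = solution_alt arrays k
instance (arrays : List Int) (k : Int) (out : Int) : Decidable (Spec_solution arrays k out) := by unfold Spec_solution; infer_instance

-- ===== CLAIM (what is proved, stated in full; the proofs are below) =====
def Claim_equal_solution : Prop := ∀ (arrays : List Int) (k : Int), Dom_solution arrays k → Pre_solution arrays k → Spec_solution arrays k (solution arrays k)

-- ===== LEMMAS AND PROOFS =====

-- the first component of B's loop state, in isolation: first position whose inclusive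
-- prefix sum exceeds k
def optFwd (k : Int) : List Int → Int → Int → Option Int
  | [], _, _ => none
  | x :: xs, s, i => if s + x > k then some (i + 1) else optFwd k xs (s + x) (i + 1)

-- the second component in isolation: last position whose exclusive prefix sum is below c
def optLast (c : Int) : List Int → Int → Int → Option Int → Option Int
  | [], _, _, acc => acc
  | x :: xs, s, i, acc => optLast c xs (s + x) (i + 1) (if s < c then some (i + 1) else acc)

theorem loopB_fst_some (k c : Int) : ∀ (xs : List Int) (s i : Int) (v : Int) (last : Option Int),
    (loopB k c xs s i (some v) last).1 = some v := by
  intro xs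
  induction xs with
  | nil => intro s i v last; rfl
  | cons x xs ih =>
      intro s i v last
      simp only [loopB]
      rw [if_neg (by simp)]
      exact ih _ _ v _

theorem loopB_fst (k c : Int) : ∀ (xs : List Int) (s i : Int) (last : Option Int),
    (loopB k c xs s i none last).1 = optFwd k xs s i := by
  intro xs
  induction xs with
  | nil => intro s i last; rfl
  | cons x xs ih =>
      intro s i last
      by_cases h : s + x > k
      · simp [loopB, optFwd, h, loopB_fst_some]
      · simp [loopB, optFwd, h, ih]

theorem loopB_snd (k c : Int) : ∀ (xs : List Int) (s i : Int) (fwd last : Option Int),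
    (loopB k c xs s i fwd last).2 = optLast c xs s i last := by
  intro xs
  induction xs with
  | nil => intro s i fwd last; rfl
  | cons x xs ih =>
      intro s i fwd last
      simp only [loopB, optLast]
      exact ih _ _ _ _

theorem fwd_eq (k : Int) : ∀ (xs : List Int) (s i : Int),
    loopFwdA xs (k - s) i = (optFwd k xs s i).getD 0 := by
  intro xs
  induction xs with
  | nil => intro s i; rfl
  | cons x xs ih =>
      intro s i
      simp only [loopFwdA, optFwd]
      by_cases h : s + x > k
      · rw [if_pos (by omega), if_pos h]; rfl
      · rw [if_neg (by omega), if_neg h]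
        have := ih (s + x) (i + 1)
        have he : k - s - x = k - (s + x) := by ring
        rw [he]
        exact this

theorem optLast_append (c : Int) : ∀ (ws : List Int) (x s i : Int) (acc : Option Int),
    optLast c (ws ++ [x]) s i acc =
      if s + ws.sum < c then some (i + ws.length + 1) else optLast c ws s i acc := by
  intro ws
  induction ws with
  | nil => intro x s i acc; simp [optLast]
  | cons w ws ih =>
      intro x s i acc
      simp only [List.cons_append, optLast, ih, List.sum_cons, List.length_cons]
      by_cases h : s + (w + ws.sum) < c
      · rw [if_pos (by omega), if_pos h]
        congr 1
        push_cast
        ring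
      · rw [if_neg (by omega), if_neg h]

theorem rev_eq (k c : Int) : ∀ (xs : List Int) (j n : Int) (s : Int),
    loopRevA xs.reverse (s + xs.sum - c) j n =
      (optLast c xs s (n - j - xs.length) none).getD 0 := by
  intro xs
  induction xs using List.reverseRecOn with
  | nil => intro j n s; simp [loopRevA, optLast]
  | append_singleton ws x ih =>
      intro j n s
      rw [List.reverse_append, List.reverse_singleton, List.singleton_append]
      simp only [loopRevA, optLast_append, List.sum_append, List.sum_singleton, List.length_append,
        List.length_singleton]
      by_cases h : s + ws.sum < c
      · rw [if_pos (by omega), if_pos h]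
        simp only [Option.getD_some]
        push_cast
        ring
      · rw [if_neg (by omega), if_neg h]
        have e1 : s + (ws.sum + x) - c - x = s + ws.sum - c := by ring
        rw [e1]
        push_cast
        have e2 : n - j - ((ws.length : Int) + 1) = n - (j + 1) - ws.length := by ring
        rw [e2]
        exact ih (j + 1) n s

-- ===== VERDICT (by name: the statement is the Claim_ definition above) =====
theorem solution_spec : Claim_equal_solution := by
  intro arrays k _ _
  unfold Spec_solution solution solution_alt
  by_cases h : k > arrays.sum
  · simp only [if_pos h, loopB_snd]
    have := rev_eq k (2 * arrays.sum - k) arrays (0 : Int) (arrays.length : Int) (0 : Int)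
    have he : (0 : Int) + arrays.sum - (2 * arrays.sum - k) = k - arrays.sum := by ring
    have he2 : (arrays.length : Int) - 0 - arrays.length = 0 := by ring
    rw [he, he2] at this
    exact this
  · simp only [if_neg h, loopB_fst]
    have := fwd_eq k arrays 0 0
    simpa using this
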